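-- pv_equiv track=rewrite | github.com/thiagohenrique0810/NexaLang | bootstrap/semantic.py | split_generic_args
-- ===== SOURCE A (Python) =====
-- def split_generic_args(s):
--     args = []
--     depth = 0
--     current = ""
--     for char in s:
--         if char == '<': depth += 1
--         elif char == '>': depth -= 1
--
--         if char == ',' and depth == 0:
--             args.append(current.strip())
--             current = ""
--         else:
--             current += char
--     if current: args.append(current.strip())
--     return args
-- ===== SOURCE B (Python) =====
-- def split_generic_args(s):
--     # One pass collects the indices of top-level commas; the result is built
--     # by slicing the original string between consecutive boundaries.
--     cuts = []
--     depth = 0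
--     for i, ch in enumerate(s):
--         if ch == '<':
--             depth += 1
--         elif ch == '>':
--             depth -= 1
--         elif ch == ',' and depth == 0:
--             cuts.append(i)
--     out = []
--     start = 0
--     for c in cuts:
--         out.append(s[start:c].strip())
--         start = c + 1
--     last = s[start:]
--     if last:
--         out.append(last.strip())
--     return out
-- ===== Notes on version B (the rewrite author's own statement) =====
-- stated objective: alternative
-- what changed: Instead of accumulating the current segment character by character, B records the indices of top-level commas in one depth-tracking pass and then builds the result by slicing the original string between consecutive boundaries, keeping the trailing if-non-empty guard.
import Mathlib
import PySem

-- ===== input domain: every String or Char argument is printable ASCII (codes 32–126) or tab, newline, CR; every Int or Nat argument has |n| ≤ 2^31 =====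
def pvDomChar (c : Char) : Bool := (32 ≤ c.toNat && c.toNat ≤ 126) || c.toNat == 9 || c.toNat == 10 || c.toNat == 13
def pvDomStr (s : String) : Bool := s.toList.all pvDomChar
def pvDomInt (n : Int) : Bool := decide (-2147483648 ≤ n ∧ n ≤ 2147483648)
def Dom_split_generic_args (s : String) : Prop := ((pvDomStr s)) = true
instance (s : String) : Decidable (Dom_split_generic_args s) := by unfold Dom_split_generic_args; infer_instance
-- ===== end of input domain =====

-- B builds the result by slicing between recorded top-level comma indices instead of
-- accumulating the current segment character by character (alternative decomposition).

-- ===== PORT A =====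
-- A: one fold carrying (args, depth, current); the current segment is grown char by char.
def split_generic_args (s : String) : List String :=
  let st := s.toList.foldl
    (fun (acc : List String × Int × List Char) ch =>
      let args := acc.1
      let depth := if ch = '<' then acc.2.1 + 1 else if ch = '>' then acc.2.1 - 1 else acc.2.1
      let current := acc.2.2
      if ch = ',' ∧ depth = 0 then
        (args ++ [String.ofList (PySem.Chars.strip current)], depth, [])
      else
        (args, depth, current ++ [ch]))
    ([], 0, [])
  if st.2.2 ≠ [] then st.1 ++ [String.ofList (PySem.Chars.strip st.2.2)] else st.1

-- ===== PORT B =====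
-- B: pass 1 records indices of depth-0 commas; pass 2 slices the string between boundaries.
def split_generic_args_alt (s : String) : List String :=
  let cs := s.toList
  let cuts := ((PySem.List.enumerate cs 0).foldl
    (fun (acc : List Int × Int) p =>
      if p.2 = '<' then (acc.1, acc.2 + 1)
      else if p.2 = '>' then (acc.1, acc.2 - 1)
      else if p.2 = ',' ∧ acc.2 = 0 then (acc.1 ++ [p.1], acc.2)
      else acc)
    ([], 0)).1
  let bld := cuts.foldl
    (fun (acc : List String × Int) c =>
      (acc.1 ++ [String.ofList (PySem.Chars.strip (PySem.List.slice cs (some acc.2) (some c)))], c + 1))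
    ([], 0)
  let last := PySem.List.slice cs (some bld.2) none
  if last ≠ [] then bld.1 ++ [String.ofList (PySem.Chars.strip last)] else bld.1

-- ===== PRECONDITION & SPEC =====
def Spec_split_generic_args (s : String) (out : List String) : Prop := out = split_generic_args_alt s
instance (s : String) (out : List String) : Decidable (Spec_split_generic_args s out) := by unfold Spec_split_generic_args; infer_instance

-- ===== CLAIM (what is proved, stated in full; the proofs are below) =====
def Claim_equal_split_generic_args : Prop := ∀ (s : String), Dom_split_generic_args s → Spec_split_generic_args s (split_generic_args s)

-- ===== LEMMAS AND PROOFS =====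

-- Recursive restatement of A's fold (including the final non-empty-current guard).
def afold : List Char → List String → Int → List Char → List String
  | [], args, _, cur => if cur ≠ [] then args ++ [String.ofList (PySem.Chars.strip cur)] else args
  | ch :: r, args, d, cur =>
      let d' := if ch = '<' then d + 1 else if ch = '>' then d - 1 else d
      if ch = ',' ∧ d' = 0 then afold r (args ++ [String.ofList (PySem.Chars.strip cur)]) d' []
      else afold r args d' (cur ++ [ch])

-- Recursive restatement of B's first pass: indices (from i) of depth-0 commas.
def bcuts : List Char → Int → Int → List Int
  | [], _, _ => []
  | ch :: r, i, d =>
      if ch = '<' then bcuts r (i + 1) (d + 1)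
      else if ch = '>' then bcuts r (i + 1) (d - 1)
      else if ch = ',' ∧ d = 0 then i :: bcuts r (i + 1) d
      else bcuts r (i + 1) d

-- Recursive restatement of B's second pass (including the final guard).
def bbuild (full : List Char) : Int → List Int → List String
  | start, [] =>
      let last := PySem.List.slice full (some start) none
      if last ≠ [] then [String.ofList (PySem.Chars.strip last)] else []
  | start, c :: cs =>
      String.ofList (PySem.Chars.strip (PySem.List.slice full (some start) (some c))) :: bbuild full (c + 1) cs

theorem afold_eq (s : String) :
    split_generic_args s = afold s.toList [] 0 [] := by
  unfold split_generic_args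
  generalize s.toList = cs
  suffices h : ∀ (cs : List Char) (args : List String) (d : Int) (cur : List Char),
      (let st := cs.foldl
        (fun (acc : List String × Int × List Char) ch =>
          let args := acc.1
          let depth := if ch = '<' then acc.2.1 + 1 else if ch = '>' then acc.2.1 - 1 else acc.2.1
          let current := acc.2.2
          if ch = ',' ∧ depth = 0 then
            (args ++ [String.ofList (PySem.Chars.strip current)], depth, [])
          else
            (args, depth, current ++ [ch]))
        (args, d, cur)
      if st.2.2 ≠ [] then st.1 ++ [String.ofList (PySem.Chars.strip st.2.2)] else st.1)
      = afold cs args d cur by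
    exact h cs [] 0 []
  intro cs
  induction cs with
  | nil => intro args d cur; simp [afold]
  | cons ch r ih =>
      intro args d cur
      simp only [List.foldl_cons, afold]
      by_cases hcomma : ch = ',' ∧ (if ch = '<' then d + 1 else if ch = '>' then d - 1 else d) = 0
      · simp only [if_pos hcomma]
        exact ih _ _ _
      · simp only [if_neg hcomma]
        exact ih _ _ _

theorem bcuts_eq (cs : List Char) :
    ∀ (i : Int) (d : Int) (acc : List Int),
      ((PySem.List.enumerate cs i).foldl
        (fun (acc : List Int × Int) p =>
          if p.2 = '<' then (acc.1, acc.2 + 1)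
          else if p.2 = '>' then (acc.1, acc.2 - 1)
          else if p.2 = ',' ∧ acc.2 = 0 then (acc.1 ++ [p.1], acc.2)
          else acc)
        (acc, d)).1 = acc ++ bcuts cs i d := by
  induction cs with
  | nil => intro i d acc; simp [PySem.List.enumerate_nil, bcuts]
  | cons ch r ih =>
      intro i d acc
      rw [PySem.List.enumerate_cons]
      simp only [List.foldl_cons, bcuts]
      by_cases h1 : ch = '<'
      · simp only [if_pos h1]; exact ih _ _ _
      · simp only [if_neg h1]
        by_cases h2 : ch = '>'
        · simp only [if_pos h2]; exact ih _ _ _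
        · simp only [if_neg h2]
          by_cases h3 : ch = ',' ∧ d = 0
          · simp only [if_pos h3]
            rw [ih]; simp
          · simp only [if_neg h3]; exact ih _ _ _

theorem bbuild_eq (full : List Char) (cuts : List Int) :
    ∀ (start : Int) (out : List String),
      (let bld := cuts.foldl
        (fun (acc : List String × Int) c =>
          (acc.1 ++ [String.ofList (PySem.Chars.strip (PySem.List.slice full (some acc.2) (some c)))], c + 1))
        (out, start)
      let last := PySem.List.slice full (some bld.2) none
      if last ≠ [] then bld.1 ++ [String.ofList (PySem.Chars.strip last)] else bld.1)
      = out ++ bbuild full start cuts := by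
  induction cuts with
  | nil => intro start out; simp [bbuild]; split <;> simp
  | cons c cs ih =>
      intro start out
      simp only [List.foldl_cons, bbuild]
      rw [ih]
      simp

-- Main invariant: with pre the already-consumed prefix, start ≤ |pre| the position after the
-- last top-level comma, and cur = pre.drop start, A's fold and B's slice-build agree.
theorem main_inv (rest : List Char) :
    ∀ (pre : List Char) (start : Nat) (args : List String) (d : Int),
      start ≤ pre.length →
      afold rest args d (pre.drop start) =
        args ++ bbuild (pre ++ rest) (start : Int) (bcuts rest (pre.length : Int) d) := by
  induction rest with
  | nil =>
      intro pre start args d hstart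
      simp only [afold, bcuts, bbuild, List.append_nil]
      rw [PySem.List.slice_from_natCast]
      split <;> simp
  | cons ch r ih =>
      intro pre start args d hstart
      simp only [afold, bcuts]
      by_cases h1 : ch = '<'
      · simp only [h1]
        simp only [reduceIte, Char.reduceEq, false_and, if_false]
        have := ih (pre ++ ['<']) start args (d + 1) (by simp; omega)
        simpa [List.drop_append_of_le_length hstart, List.append_assoc] using this
      · by_cases h2 : ch = '>'
        · simp only [h2]
          simp only [reduceIte, Char.reduceEq, false_and, if_false]
          have := ih (pre ++ ['>']) start args (d - 1) (by simp; omega)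
          simpa [List.drop_append_of_le_length hstart, List.append_assoc] using this
        · simp only [if_neg h1, if_neg h2]
          by_cases h3 : ch = ',' ∧ d = 0
          · obtain ⟨hc, hd0⟩ := h3
            subst hc hd0
            simp only [and_self, if_true, bbuild]
            have hslice : PySem.List.slice (pre ++ ',' :: r) ((start : Int)) ((pre.length : Int))
                = pre.drop start := by
              rw [PySem.List.slice_natCast, List.drop_append_of_le_length hstart]
              rw [List.take_append_of_le_length (by simp [List.length_drop])]
              exact List.take_of_length_le (by simp [List.length_drop])
            have hih := ih (pre ++ [',']) (pre.length + 1)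
              (args ++ [String.ofList (PySem.Chars.strip (pre.drop start))]) 0 (by simp)
            have hdrop : (pre ++ [',']).drop (pre.length + 1) = [] := by
              apply List.drop_of_length_le; simp
            rw [hdrop] at hih
            rw [hih, hslice]
            simp [List.append_assoc]
          · simp only [if_neg h3]
            have := ih (pre ++ [ch]) start args d (by simp; omega)
            simpa [List.drop_append_of_le_length hstart, List.append_assoc] using this

-- ===== VERDICT (by name: the statement is the Claim_ definition above) =====
theorem split_generic_args_spec : Claim_equal_split_generic_args := by
  intro s _
  unfold Spec_split_generic_args
  rw [afold_eq]
  simp only [split_generic_args_alt, bcuts_eq, bbuild_eq, List.nil_append]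
  have := main_inv s.toList [] 0 [] 0 (by simp)
  simpa using this
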